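-- pv_equiv track=rewrite | github.com/mkstas/LearningVyatSu | automata-theory/labaratory-work-2/example.py | strategy_B
-- ===== SOURCE A (Python) =====
-- ROCK = 1  # Камень
--
-- PAPER = 2  # Бумага
--
-- SCISSORS = 3  # Ножницы
--
-- def counter(move: int) -> int:
--     """Возвращает ход, побеждающий данный."""
--     if move == ROCK:
--         return PAPER
--     elif move == PAPER:
--         return SCISSORS
--     elif move == SCISSORS:
--         return ROCK
--     else:
--         return PAPER
--
-- def strategy_B(game_data: list[list[int]]) -> int:
--     """Модификация стратегии A: анализирует пары (enemy, bot)."""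
--     n = 2
--     enemy_moves = game_data[0]
--     bot_moves = game_data[1]
--
--     if len(enemy_moves) <= n or len(bot_moves) <= n:
--         return PAPER
--     pattern = list(zip(enemy_moves[-n:], bot_moves[-n:]))
--     for i in range(len(enemy_moves) - n - 1, -1, -1):
--         past_pattern = list(zip(enemy_moves[i: i + n], bot_moves[i: i + n]))
--         if past_pattern == pattern:
--             predicted_enemy = enemy_moves[i + n]
--             return counter(predicted_enemy)
--     return SCISSORS
-- ===== SOURCE B (Python) =====
-- ROCK = 1
-- PAPER = 2
-- SCISSORS = 3
--
-- def counter(move: int) -> int: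
--     if move == ROCK:
--         return PAPER
--     elif move == PAPER:
--         return SCISSORS
--     elif move == SCISSORS:
--         return ROCK
--     else:
--         return PAPER
--
-- def strategy_B(game_data: list[list[int]]) -> int:
--     """One forward pass indexing every (enemy, bot) pair-window by its most
--     recent start position, then a single dict lookup of the latest window."""
--     n = 2
--     enemy_moves = game_data[0]
--     bot_moves = game_data[1]
--     if len(enemy_moves) <= n or len(bot_moves) <= n:
--         return PAPER
--     index = {}
--     for i in range(len(enemy_moves) - n):
--         key = tuple(zip(enemy_moves[i: i + n], bot_moves[i: i + n]))
--         index[key] = i  # later windows overwrite: each key maps to its most recent start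
--     pattern = tuple(zip(enemy_moves[-n:], bot_moves[-n:]))
--     if pattern in index:
--         return counter(enemy_moves[index[pattern] + n])
--     return SCISSORS
-- ===== Notes on version B (the rewrite author's own statement) =====
-- stated objective: alternative
-- what changed: A scans backward over all window start positions comparing each pair-window to the latest pattern until the first (most recent) match; B makes one forward pass building a dict from each pair-window to its most recent start index (last write wins) and then answers with a single dict lookup of the latest pattern.
import Mathlib
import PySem

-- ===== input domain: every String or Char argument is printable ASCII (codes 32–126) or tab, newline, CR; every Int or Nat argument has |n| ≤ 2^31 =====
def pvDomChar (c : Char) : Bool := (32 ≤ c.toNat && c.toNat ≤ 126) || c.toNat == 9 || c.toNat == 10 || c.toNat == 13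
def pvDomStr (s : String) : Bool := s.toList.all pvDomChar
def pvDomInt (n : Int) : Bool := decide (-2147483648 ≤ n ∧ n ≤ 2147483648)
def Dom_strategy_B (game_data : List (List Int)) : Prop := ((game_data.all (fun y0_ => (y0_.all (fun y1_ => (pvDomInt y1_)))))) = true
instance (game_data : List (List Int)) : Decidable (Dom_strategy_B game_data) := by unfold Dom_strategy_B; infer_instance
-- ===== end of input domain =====

-- B replaces A's backward linear pattern scan by a forward pass that indexes every
-- pair-window in a dict (last write wins = most recent index) plus one lookup (objective: alternative).

-- ===== PORT A =====
-- shared module helper `counter`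
def pyCounter (move : Int) : Int :=
  if move = 1 then 2 else if move = 2 then 3 else if move = 3 then 1 else 2

-- the backward `for i in range(len(enemy)-n-1, -1, -1)` loop with early return;
-- `strategyALoop … (m+1)` examines index i = m.  enemy[i+n] is always in range
-- there (i ≤ len-3), so `pyGetD … 0` is exact.
def strategyALoop (enemy bot : List Int) (pattern : List (Int × Int)) : Nat → Option Int
  | 0 => none
  | m + 1 =>
    let past := (PySem.List.slice enemy (some (m : Int)) (some ((m : Int) + 2))).zip
                (PySem.List.slice bot (some (m : Int)) (some ((m : Int) + 2)))
    if past = pattern then some (pyCounter (PySem.List.pyGetD enemy ((m : Int) + 2) 0))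
    else strategyALoop enemy bot pattern m

def strategy_B (game_data : List (List Int)) : Int :=
  let enemy := PySem.List.pyGetD game_data 0 []   -- game_data[0]; Pre_ guarantees the index exists
  let bot := PySem.List.pyGetD game_data 1 []     -- game_data[1]
  if enemy.length ≤ 2 ∨ bot.length ≤ 2 then 2
  else
    let pattern := (PySem.List.slice enemy (some (-2)) none).zip
                   (PySem.List.slice bot (some (-2)) none)
    match strategyALoop enemy bot pattern (enemy.length - 2) with
    | some r => r
    | none => 3

-- ===== PORT B =====
def strategy_B_alt (game_data : List (List Int)) : Int :=
  let enemy := PySem.List.pyGetD game_data 0 []   -- game_data[0]; Pre_ guarantees the index exists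
  let bot := PySem.List.pyGetD game_data 1 []     -- game_data[1]
  if enemy.length ≤ 2 ∨ bot.length ≤ 2 then 2
  else
    let index : PySem.Dict (List (Int × Int)) Int :=
      (PySem.List.pyRange 0 ((enemy.length : Int) - 2) 1).foldl
        (fun d i =>
          d.insert ((PySem.List.slice enemy (some i) (some (i + 2))).zip
                    (PySem.List.slice bot (some i) (some (i + 2)))) i)
        PySem.Dict.empty
    let pattern := (PySem.List.slice enemy (some (-2)) none).zip
                   (PySem.List.slice bot (some (-2)) none)
    match index.get? pattern with
    | some idx => pyCounter (PySem.List.pyGetD enemy (idx + 2) 0)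
    | none => 3

-- ===== PRECONDITION & SPEC =====
-- Python's game_data[0] / game_data[1] raise IndexError when fewer than two lists are given.
def Pre_strategy_B (game_data : List (List Int)) : Prop := 2 ≤ game_data.length
instance (game_data : List (List Int)) : Decidable (Pre_strategy_B game_data) := by
  unfold Pre_strategy_B; infer_instance

def pvWitness_strategy_B : List (List Int) := [[1, 2, 3, 1], [3, 1, 2, 3]]

def Spec_strategy_B (game_data : List (List Int)) (out : Int) : Prop := out = strategy_B_alt game_data
instance (game_data : List (List Int)) (out : Int) : Decidable (Spec_strategy_B game_data out) := by
  unfold Spec_strategy_B; infer_instance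

-- ===== CLAIM (what is proved, stated in full; the proofs are below) =====
def Claim_equal_strategy_B : Prop := ∀ (game_data : List (List Int)), Dom_strategy_B game_data → Pre_strategy_B game_data → Spec_strategy_B game_data (strategy_B game_data)

-- ===== LEMMAS AND PROOFS =====

-- looking a key up in a dict built by left-to-right `insert` = last (most recent) write
theorem get_foldl_insert {K : Type} [BEq K] [LawfulBEq K]
    (f : Int → K) (l : List Int) (d : PySem.Dict K Int) (k : K) :
    (l.foldl (fun d i => d.insert (f i) i) d).get? k =
      match l.reverse.find? (fun i => f i == k) with
      | some i => some i
      | none => d.get? k := by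
  induction l generalizing d with
  | nil => simp
  | cons a l ih =>
    simp only [List.foldl_cons, List.reverse_cons, List.find?_append, ih]
    cases h : l.reverse.find? (fun i => f i == k) with
    | some i => simp
    | none =>
      simp only [List.find?_cons, List.find?_nil]
      cases hk : f a == k with
      | true =>
        have : f a = k := eq_of_beq hk
        subst this
        simp [PySem.Dict.get?_insert_self]
      | false =>
        have hne : k ≠ f a := by intro he; rw [he] at hk; simp at hk
        simp [PySem.Dict.get?_insert_of_ne _ _ hne]

-- A's backward early-return loop = first match scanning the forward index range backward
theorem strategyALoop_eq (enemy bot : List Int) (pattern : List (Int × Int)) (m : Nat) :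
    strategyALoop enemy bot pattern m =
      ((PySem.List.pyRange 0 (m : Int) 1).reverse.find? (fun i =>
          (PySem.List.slice enemy (some i) (some (i + 2))).zip
          (PySem.List.slice bot (some i) (some (i + 2))) == pattern)).map
        (fun i => pyCounter (PySem.List.pyGetD enemy (i + 2) 0)) := by
  induction m with
  | zero => simp [strategyALoop, PySem.List.pyRange_one_eq_nil]
  | succ m ih =>
    have hcast : ((m + 1 : Nat) : Int) = (m : Int) + 1 := by push_cast; ring
    rw [hcast, PySem.List.pyRange_one_succ_right (show (0:Int) ≤ (m:Int) from Int.natCast_nonneg m)]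
    simp only [List.reverse_append, List.reverse_cons, List.reverse_nil, List.nil_append,
      List.cons_append, List.find?_cons]
    by_cases h : (PySem.List.slice enemy (some (m : Int)) (some ((m : Int) + 2))).zip
                 (PySem.List.slice bot (some (m : Int)) (some ((m : Int) + 2))) = pattern
    . simp [strategyALoop, h]
    . simp only [strategyALoop, h, if_false]
      rw [ih]
      have hb : ((PySem.List.slice enemy (some (m : Int)) (some ((m : Int) + 2))).zip
                 (PySem.List.slice bot (some (m : Int)) (some ((m : Int) + 2))) == pattern) = false := by
        simpa using h
      rw [hb]

-- ===== VERDICT (by name: the statement is the Claim_ definition above) =====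
theorem strategy_B_spec : Claim_equal_strategy_B := by
  intro game_data _dom _pre
  unfold Spec_strategy_B strategy_B strategy_B_alt
  set enemy := PySem.List.pyGetD game_data 0 [] with henemy
  set bot := PySem.List.pyGetD game_data 1 [] with hbot
  by_cases hg : enemy.length ≤ 2 ∨ bot.length ≤ 2
  . simp [hg]
  . simp only [hg, if_false]
    have hlen : (2 : Nat) < enemy.length := by omega
    set pattern := (PySem.List.slice enemy (some (-2)) none).zip
                   (PySem.List.slice bot (some (-2)) none) with hpat
    rw [get_foldl_insert (fun i =>
        (PySem.List.slice enemy (some i) (some (i + 2))).zip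
        (PySem.List.slice bot (some i) (some (i + 2))))]
    rw [strategyALoop_eq enemy bot pattern (enemy.length - 2)]
    have hcast : ((enemy.length - 2 : Nat) : Int) = (enemy.length : Int) - 2 := by omega
    rw [hcast]
    cases hf : (PySem.List.pyRange 0 ((enemy.length : Int) - 2) 1).reverse.find? (fun i =>
        (PySem.List.slice enemy (some i) (some (i + 2))).zip
        (PySem.List.slice bot (some i) (some (i + 2))) == pattern) with
    | some i => simp
    | none => simp
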